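-- pv_equiv track=rewrite | github.com/bel52/FanDuel_LeaguePicks | app/optimizer.py | _validate_lineup
-- ===== SOURCE A (Python) =====
-- from typing import Dict, List, Optional, Any, Tuple
--
-- def _validate_lineup(players: List[Dict]) -> bool:
--     """Validate lineup meets FanDuel requirements"""
--     if len(players) != 9:  # FanDuel NFL requires 9 players
--         return False
--
--     positions = [p['position'] for p in players]
--     position_counts = {}
--     for pos in positions:
--         position_counts[pos] = position_counts.get(pos, 0) + 1
--
--     # Check position requirements
--     required = {'QB': 1, 'RB': 2, 'WR': 3, 'TE': 1, 'DST': 1}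
--     # Note: FLEX is handled as extra RB/WR/TE
--
--     total_flex_eligible = position_counts.get('RB', 0) + position_counts.get('WR', 0) + position_counts.get('TE', 0)
--
--     return (
--         position_counts.get('QB', 0) == 1 and
--         position_counts.get('DST', 0) == 1 and
--         total_flex_eligible == 7  # 2 RB + 3 WR + 1 TE + 1 FLEX
--     )
-- ===== SOURCE B (Python) =====
-- def _validate_lineup(players):
--     """Validate lineup meets FanDuel requirements"""
--     if len(players) != 9:
--         return False
--     # A 9-player lineup is valid iff its non-flex-eligible positions are exactly
--     # one QB and one DST: the remaining 7 players are then the flex-eligible ones.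
--     others = sorted(p['position'] for p in players
--                     if p['position'] not in ('RB', 'WR', 'TE'))
--     return others == ['DST', 'QB']
-- ===== Notes on version B (the rewrite author's own statement) =====
-- stated objective: simpler
-- what changed: B replaces A's counting dictionary and three count comparisons with a canonicalize-and-compare: it filters out the flex-eligible positions, sorts the remainder, and checks that this sorted residue is exactly ['DST','QB'] (with length 9 that forces 1 QB, 1 DST and 7 flex-eligible players).
import Mathlib
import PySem

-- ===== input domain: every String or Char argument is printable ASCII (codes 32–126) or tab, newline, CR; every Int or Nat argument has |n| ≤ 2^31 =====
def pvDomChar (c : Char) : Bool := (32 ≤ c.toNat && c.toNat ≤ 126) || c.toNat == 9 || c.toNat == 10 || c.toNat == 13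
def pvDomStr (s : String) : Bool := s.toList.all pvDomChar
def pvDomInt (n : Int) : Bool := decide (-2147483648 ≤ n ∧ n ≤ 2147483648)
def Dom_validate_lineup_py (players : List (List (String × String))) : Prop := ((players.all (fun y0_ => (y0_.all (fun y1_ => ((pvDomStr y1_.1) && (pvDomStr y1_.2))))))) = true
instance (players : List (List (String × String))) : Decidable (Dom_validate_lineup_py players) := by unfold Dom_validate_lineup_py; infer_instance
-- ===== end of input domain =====

-- B drops A's counting dictionary: after the length guard it sorts the non-flex-eligible
-- positions and compares them to ["DST","QB"] (canonicalize-and-compare; simpler decomposition).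


-- ===== PORT A =====
-- p['position'] would raise KeyError on a missing key; Pre_ excludes that case, so the
-- default "" of getD is never reached on admitted inputs.
def validate_lineup_py (players : List (List (String × String))) : Bool :=
  if players.length ≠ 9 then false
  else
    let positions := players.map (fun p => PySem.Dict.getD (PySem.Dict.mk p) "position" "")
    let position_counts :=
      positions.foldl (fun d pos => PySem.Dict.insert d pos (PySem.Dict.getD d pos 0 + 1))
        (PySem.Dict.empty : PySem.Dict String Int)
    let total_flex_eligible :=
      PySem.Dict.getD position_counts "RB" 0 + PySem.Dict.getD position_counts "WR" 0 +
        PySem.Dict.getD position_counts "TE" 0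
    (PySem.Dict.getD position_counts "QB" 0 == 1) &&
      (PySem.Dict.getD position_counts "DST" 0 == 1) && (total_flex_eligible == 7)

-- ===== PORT B =====
def validate_lineup_py_alt (players : List (List (String × String))) : Bool :=
  if players.length ≠ 9 then false
  else
    let others :=
      PySem.List.sorted
        ((players.map (fun p => PySem.Dict.getD (PySem.Dict.mk p) "position" "")).filter
          (fun s => !(s == "RB" || s == "WR" || s == "TE")))
        (fun x => x) false
    others == ["DST", "QB"]

-- ===== PRECONDITION & SPEC =====
-- Pre_ excludes exactly the inputs where A raises KeyError: a 9-player list in which some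
-- player dict lacks the 'position' key (B raises there too).
def Pre_validate_lineup_py (players : List (List (String × String))) : Prop :=
  players.length = 9 → ∀ p ∈ players, PySem.Dict.contains (PySem.Dict.mk p) "position" = true
instance (players : List (List (String × String))) : Decidable (Pre_validate_lineup_py players) := by
  unfold Pre_validate_lineup_py; infer_instance
def pvWitness_validate_lineup_py : (List (List (String × String))) :=
  [[("position","QB")],[("position","RB")],[("position","RB")],[("position","WR")],
   [("position","WR")],[("position","WR")],[("position","TE")],[("position","RB")],
   [("position","DST")]]
def Spec_validate_lineup_py (players : List (List (String × String))) (out : Bool) : Prop := out = validate_lineup_py_alt players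
instance (players : List (List (String × String))) (out : Bool) : Decidable (Spec_validate_lineup_py players out) := by unfold Spec_validate_lineup_py; infer_instance

-- ===== CLAIM (what is proved, stated in full; the proofs are below) =====
def Claim_equal_validate_lineup_py : Prop := ∀ (players : List (List (String × String))), Dom_validate_lineup_py players → Pre_validate_lineup_py players → Spec_validate_lineup_py players (validate_lineup_py players)

-- ===== LEMMAS AND PROOFS =====

-- splitting the count of flex-eligible elements into the three position counts
theorem countP_flex_split (l : List String) :
    l.countP (fun s => s == "RB" || s == "WR" || s == "TE") =
      l.count "RB" + l.count "WR" + l.count "TE" := by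
  induction l with
  | nil => simp
  | cons h t ih =>
    simp only [List.countP_cons, List.count_cons]
    by_cases h1 : h = "RB" <;> by_cases h2 : h = "WR" <;> by_cases h3 : h = "TE" <;>
      simp_all <;> omega

-- a two-element list with one "DST" and one "QB" is a permutation of ["DST","QB"]
theorem perm_DST_QB (l : List String) (hlen : l.length = 2)
    (hd : l.count "DST" = 1) (hq : l.count "QB" = 1) : l.Perm ["DST", "QB"] := by
  match l, hlen with
  | [a, b], _ =>
    simp only [List.count_cons, List.count_nil] at hd hq
    by_cases h1 : a = "DST" <;> by_cases h2 : b = "DST" <;>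
      by_cases h3 : a = "QB" <;> by_cases h4 : b = "QB" <;> simp_all <;> decide

-- the filtered residue is ["DST","QB"] (after sorting) iff the three count conditions hold
theorem sorted_residue_iff (q : List String) (h9 : q.length = 9) :
    (PySem.List.sorted (q.filter (fun s => !(s == "RB" || s == "WR" || s == "TE")))
        (fun x => x) false = ["DST", "QB"]) ↔
      (q.count "QB" = 1 ∧ q.count "DST" = 1 ∧
        q.count "RB" + q.count "WR" + q.count "TE" = 7) := by
  set l := q.filter (fun s => !(s == "RB" || s == "WR" || s == "TE")) with hl
  have hcd : l.count "DST" = q.count "DST" := by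
    simp [hl, List.count_filter]
  have hcq : l.count "QB" = q.count "QB" := by
    simp [hl, List.count_filter]
  have hsplit : q.countP (fun s => (s == "RB" || s == "WR" || s == "TE")) +
      q.countP (fun s => !(s == "RB" || s == "WR" || s == "TE")) = q.length := by
    rw [List.countP_eq_length_filter, List.countP_eq_length_filter]
    exact (List.length_eq_length_filter_add _).symm
  have hll : l.length + (q.count "RB" + q.count "WR" + q.count "TE") = 9 := by
    rw [hl, ← List.countP_eq_length_filter, ← countP_flex_split] at *
    omega
  constructor
  · intro h
    have hperm : l.Perm ["DST", "QB"] := by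
      have hp := PySem.List.sorted_perm l (fun x : String => x) false
      rw [h] at hp
      exact hp.symm
    have hd := hperm.count_eq "DST"
    have hq := hperm.count_eq "QB"
    have hlen := hperm.length_eq
    simp at hd hq hlen
    exact ⟨by omega, by omega, by omega⟩
  · rintro ⟨h1, h2, h3⟩
    have hperm : l.Perm ["DST", "QB"] :=
      perm_DST_QB l (by omega) (by omega) (by omega)
    exact PySem.List.sorted_id_eq_of_perm_of_pairwise l ["DST", "QB"] hperm.symm (by norm_num; decide)

-- ===== VERDICT (by name: the statement is the Claim_ definition above) =====
theorem validate_lineup_py_spec : Claim_equal_validate_lineup_py := by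
  intro players _ _
  unfold Spec_validate_lineup_py validate_lineup_py validate_lineup_py_alt
  by_cases h : players.length ≠ 9
  · simp [h]
  · simp only [ne_eq, not_not] at h
    simp only [h, ne_eq, not_true_eq_false, if_false]
    set q := players.map (fun p => PySem.Dict.getD (PySem.Dict.mk p) "position" "") with hq
    have h9 : q.length = 9 := by simp [hq, h]
    rw [PySem.Dict.foldl_insert_getD_add_one_eq_counter]
    simp only [PySem.Dict.getD_counter]
    apply Bool.eq_iff_iff.mpr
    simp only [Bool.and_eq_true, beq_iff_eq]
    have hiff := sorted_residue_iff q h9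
    constructor
    · rintro ⟨⟨hq1, hd1⟩, hf⟩
      exact hiff.mpr ⟨by exact_mod_cast hq1, by exact_mod_cast hd1, by exact_mod_cast hf⟩
    · intro hsor
      obtain ⟨h1, h2, h3⟩ := hiff.mp hsor
      refine ⟨⟨?_, ?_⟩, ?_⟩ <;> push_cast [h1, h2] <;> omega
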